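-- pv_equiv track=rewrite | github.com/cgerchenhp/TAPython_ChameleonTest | TA/TAPython/Python/ChameleonTest/chameleonmaterial.py | trans_enum_str
-- ===== SOURCE A (Python) =====
-- def trans_enum_str(enum_str):
--     result = ""
--     s0 = enum_str[:enum_str.find("_")+1]
--     s1 = enum_str[enum_str.find("_")+1:]
--     new_s1 = ""
--
--     for i, c in enumerate(s1):
--         if c.isupper() and i > 0 and s1[i-1].isupper():
--             c = c.lower()
--         new_s1 += c
--     enum_str = s0 + new_s1
--     bV = False
--     for i, c in enumerate(enum_str):
--         if not bV:
--             bV |= c == "_"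
--         else:
--             if c.isupper() and i > 0 and enum_str[i-1] != "_":
--                 result += "_"
--         result += c
--
--     return result.upper()
-- ===== SOURCE B (Python) =====
-- def trans_enum_str(enum_str):
--     out = []
--     seen = False
--     prev = ""
--     for c in enum_str:
--         if not seen:
--             out.append(c)
--             if c == "_":
--                 seen = True
--         else:
--             e = c.lower() if (c.isupper() and prev.isupper()) else c
--             if e.isupper() and prev != "_":
--                 out.append("_")
--             out.append(e)
--         prev = c
--     return "".join(out).upper()
-- ===== Notes on version B (the rewrite author's own statement) =====
-- stated objective: simpler
-- what changed: A makes two sequential passes building intermediate strings by repeated concatenation (first lowering each uppercase that follows an uppercase after the first underscore, then rescanning the rebuilt string to insert separators before uppercase letters); B does the whole job in one left-to-right pass over the original string, tracking only whether the first underscore has been seen and the previous original character, and joins the accumulated pieces once.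
import Mathlib
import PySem

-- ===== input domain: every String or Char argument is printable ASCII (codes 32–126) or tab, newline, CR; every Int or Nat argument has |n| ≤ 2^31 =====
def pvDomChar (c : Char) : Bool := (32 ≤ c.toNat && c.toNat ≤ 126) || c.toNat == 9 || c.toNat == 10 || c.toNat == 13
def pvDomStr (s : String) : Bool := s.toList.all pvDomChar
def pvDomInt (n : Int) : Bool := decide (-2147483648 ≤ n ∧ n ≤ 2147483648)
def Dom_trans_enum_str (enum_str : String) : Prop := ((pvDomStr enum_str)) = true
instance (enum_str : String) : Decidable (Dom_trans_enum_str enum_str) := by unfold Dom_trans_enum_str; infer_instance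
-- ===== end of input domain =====

-- B replaces A's two sequential passes (lower runs of consecutive uppercase, then insert '_' before uppercase)
-- by ONE left-to-right pass tracking 'seen first underscore' and the previous original character; objective: simpler.

-- ===== PORT A =====
-- fold body of A's first loop ('for i, c in enumerate(s1): …')
def transA_step1 (s1 : List Char) (acc : List Char) (ic : Int × Char) : List Char :=
  let c := ic.2
  let c := if PySem.Chars.isupper c && decide (0 < ic.1) &&
              PySem.Chars.isupper (PySem.List.pyGetD s1 (ic.1 - 1) ' ')
           then PySem.Chars.lowerChar c else c
  acc ++ [c]

-- fold body of A's second loop ('for i, c in enumerate(enum_str): …'), state (bV, result)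
def transA_step2 (es : List Char) (st : Bool × List Char) (ic : Int × Char) : Bool × List Char :=
  let bV := st.1
  let result := st.2
  if !bV then (bV || (ic.2 == '_'), result ++ [ic.2])
  else
    let result := if PySem.Chars.isupper ic.2 && decide (0 < ic.1) &&
                     !(PySem.List.pyGetD es (ic.1 - 1) ' ' == '_')
                  then result ++ ['_'] else result
    (bV, result ++ [ic.2])

def trans_enum_str (enum_str : String) : String :=
  let result : List Char := []
  let f := PySem.Str.find enum_str "_"
  let s0 := PySem.List.slice enum_str.toList none (some (f + 1))
  let s1 := PySem.List.slice enum_str.toList (some (f + 1)) none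
  let new_s1 := (PySem.List.enumerate s1 0).foldl (transA_step1 s1) []
  let es := s0 ++ new_s1
  let st := (PySem.List.enumerate es 0).foldl (transA_step2 es) (false, result)
  String.ofList (PySem.Chars.upper st.2)

-- ===== PORT B =====
-- one pass: before the first '_' copy; after it, lower an uppercase following an uppercase,
-- and prepend '_' to a still-uppercase char whose predecessor is not '_'
def altLoop : List Char → Bool → Char → List Char
  | [], _, _ => []
  | c :: rest, seen, prev =>
    if !seen then c :: altLoop rest (c == '_') c
    else
      let e := if PySem.Chars.isupper c && PySem.Chars.isupper prev then PySem.Chars.lowerChar c else c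
      (if PySem.Chars.isupper e && !(prev == '_') then ['_', e] else [e]) ++ altLoop rest seen c

def trans_enum_str_alt (enum_str : String) : String :=
  String.ofList (PySem.Chars.upper (altLoop enum_str.toList false ' '))

-- ===== PRECONDITION & SPEC =====
def Spec_trans_enum_str (enum_str : String) (out : String) : Prop := out = trans_enum_str_alt enum_str
instance (enum_str : String) (out : String) : Decidable (Spec_trans_enum_str enum_str out) := by unfold Spec_trans_enum_str; infer_instance

-- ===== CLAIM (what is proved, stated in full; the proofs are below) =====
def Claim_equal_trans_enum_str : Prop := ∀ (enum_str : String), Dom_trans_enum_str enum_str → Spec_trans_enum_str enum_str (trans_enum_str enum_str)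

-- ===== LEMMAS AND PROOFS =====

-- recursion forms of A's two passes
def low1 : List Char → Char → List Char
  | [], _ => []
  | c :: t, p =>
    (if PySem.Chars.isupper c && PySem.Chars.isupper p then PySem.Chars.lowerChar c else c) :: low1 t c

def pass2t : List Char → Char → List Char
  | [], _ => []
  | c :: t, q => (if PySem.Chars.isupper c && !(q == '_') then ['_', c] else [c]) ++ pass2t t c

-- character facts
theorem toNat_bounds_of_isupper {c : Char} (h : PySem.Chars.isupper c = true) :
    65 ≤ c.toNat ∧ c.toNat ≤ 90 := by
  simp [PySem.Chars.isupper, Char.le_def] at h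
  exact ⟨h.1, h.2⟩

theorem lowerChar_of_isupper {c : Char} (h : PySem.Chars.isupper c = true) :
    PySem.Chars.lowerChar c = Char.ofNat (c.toNat + 32) := by
  simp [PySem.Chars.lowerChar, h]

theorem toNat_bounds_of_islower {c : Char} (h : PySem.Chars.islower c = true) :
    97 ≤ c.toNat ∧ c.toNat ≤ 122 := by
  simp [PySem.Chars.islower, Char.le_def, UInt32.le_iff_toNat_le] at h
  exact ⟨h.1, h.2⟩

theorem lowerChar_ne_underscore {c : Char} (h : PySem.Chars.isupper c = true) :
    PySem.Chars.lowerChar c ≠ '_' := by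
  rw [lowerChar_of_isupper h]
  obtain ⟨h1, h2⟩ := toNat_bounds_of_isupper h
  have hv : Nat.isValidChar (c.toNat + 32) := Or.inl (by omega)
  intro he
  have hx : (Char.ofNat (c.toNat + 32)).toNat = ('_' : Char).toNat := by rw [he]
  rw [Char.toNat_ofNat] at hx
  simp [hv] at hx
  omega

theorem toNat_lowerChar {c : Char} (h : PySem.Chars.isupper c = true) :
    (PySem.Chars.lowerChar c).toNat = c.toNat + 32 := by
  obtain ⟨h1, h2⟩ := toNat_bounds_of_isupper h
  have hv : Nat.isValidChar (c.toNat + 32) := Or.inl (by omega)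
  rw [lowerChar_of_isupper h, Char.toNat_ofNat]
  simp [hv]

theorem islower_lowerChar {c : Char} (h : PySem.Chars.isupper c = true) :
    PySem.Chars.islower (PySem.Chars.lowerChar c) = true := by
  obtain ⟨h1, h2⟩ := toNat_bounds_of_isupper h
  have ht := toNat_lowerChar h
  simp only [Char.toNat] at ht
  simp [PySem.Chars.islower, Char.le_def, UInt32.le_iff_toNat_le, ht]
  constructor <;> omega

theorem upperChar_lowerChar {c : Char} (h : PySem.Chars.isupper c = true) :
    PySem.Chars.upperChar (PySem.Chars.lowerChar c) = c := by
  have ht := toNat_lowerChar h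
  simp [PySem.Chars.upperChar, islower_lowerChar h, ht]

theorem upperChar_of_isupper {c : Char} (h : PySem.Chars.isupper c = true) :
    PySem.Chars.upperChar c = c := by
  obtain ⟨h1, h2⟩ := toNat_bounds_of_isupper h
  have hl : PySem.Chars.islower c = false := by
    by_contra hx
    obtain ⟨g1, g2⟩ := toNat_bounds_of_islower (by simpa using hx)
    omega
  simp [PySem.Chars.upperChar, hl]

theorem isupper_underscore : PySem.Chars.isupper '_' = false := by decide

-- upper erases pass 1
theorem upper_low1 (cs : List Char) (p : Char) :
    PySem.Chars.upper (low1 cs p) = PySem.Chars.upper cs := by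
  induction cs generalizing p with
  | nil => rfl
  | cons c t ih =>
    simp only [low1, PySem.Chars.upper, List.map_cons]
    have ih' : List.map PySem.Chars.upperChar (low1 t c) = List.map PySem.Chars.upperChar t := ih c
    rw [ih']
    by_cases hc : (PySem.Chars.isupper c && PySem.Chars.isupper p) = true
    · have hcu : PySem.Chars.isupper c = true := ((Bool.and_eq_true _ _).mp hc).1
      simp [hc, upperChar_lowerChar hcu, upperChar_of_isupper hcu]
    · rw [if_neg hc]

theorem mem_underscore_low1 {cs : List Char} (h : '_' ∉ cs) (p : Char) : '_' ∉ low1 cs p := by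
  induction cs generalizing p with
  | nil => simp [low1]
  | cons c t ih =>
    simp only [low1, List.mem_cons, not_or]
    have hc : c ≠ '_' := fun he => h (by simp [he])
    refine ⟨?_, ih (fun ht => h (List.mem_cons_of_mem _ ht)) c⟩
    by_cases hcond : (PySem.Chars.isupper c && PySem.Chars.isupper p) = true
    · rw [if_pos hcond]
      exact fun he => lowerChar_ne_underscore ((Bool.and_eq_true _ _).mp hcond).1 he.symm
    · rw [if_neg hcond]; exact fun he => hc he.symm

-- pass 1 fold = low1
theorem foldA_gen (post pre acc : List Char) :
    (PySem.List.enumerate post (pre.length : Int)).foldl (transA_step1 (pre ++ post)) acc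
      = acc ++ low1 post (pre.getLastD '_') := by
  induction post generalizing pre acc with
  | nil => simp [PySem.List.enumerate_nil, low1]
  | cons c t ih =>
    rw [PySem.List.enumerate_cons, List.foldl_cons]
    have hstep : transA_step1 (pre ++ c :: t) acc ((pre.length : Int), c)
        = acc ++ [if PySem.Chars.isupper c && PySem.Chars.isupper (pre.getLastD '_')
                  then PySem.Chars.lowerChar c else c] := by
      rcases List.eq_nil_or_concat pre with rfl | ⟨ys, y, rfl⟩
      · simp [transA_step1, isupper_underscore]
      · have h1 : (((ys ++ [y]).length : Nat) : Int) - 1 = ((ys.length : Nat) : Int) := by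
          push_cast [List.length_append, List.length_cons, List.length_nil]; omega
        have h2 : PySem.List.pyGetD ((ys ++ [y]) ++ c :: t) ((ys.length : Nat) : Int) ' ' = y := by
          rw [PySem.List.pyGetD_natCast, List.append_assoc, List.singleton_append]
          simp [List.getD_eq_getElem?_getD, List.getElem?_append_right]
        have h3 : decide (0 < (((ys ++ [y]).length : Nat) : Int)) = true := by
          simp [List.length_append]
        simp [transA_step1, h1, h2, h3, List.getLastD_concat]
    rw [hstep]
    have hlen2 : ((pre.length : Nat) : Int) + 1 = (((pre ++ [c]).length : Nat) : Int) := by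
      push_cast [List.length_append, List.length_cons, List.length_nil]; omega
    rw [hlen2]
    have ih' := ih (pre ++ [c])
      (acc ++ [if PySem.Chars.isupper c && PySem.Chars.isupper (pre.getLastD '_')
               then PySem.Chars.lowerChar c else c])
    rw [List.append_assoc] at ih'
    simp only [List.singleton_append, List.getLastD_concat] at ih'
    rw [ih']
    simp only [low1]
    simp [List.append_assoc]

-- pass 2 fold, bV = true phase
theorem foldB_true (post pre acc : List Char) (hpre : pre ≠ []) :
    (PySem.List.enumerate post (pre.length : Int)).foldl (transA_step2 (pre ++ post)) (true, acc)
      = (true, acc ++ pass2t post (pre.getLastD '_')) := by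
  induction post generalizing pre acc with
  | nil => simp [PySem.List.enumerate_nil, pass2t]
  | cons c t ih =>
    rcases List.eq_nil_or_concat pre with rfl | ⟨ys, y, rfl⟩
    · exact absurd rfl hpre
    simp only [List.concat_eq_append] at hpre ⊢
    rw [PySem.List.enumerate_cons, List.foldl_cons]
    have hstep : transA_step2 ((ys ++ [y]) ++ c :: t) (true, acc) (((ys ++ [y]).length : Int), c)
        = (true, acc ++ (if PySem.Chars.isupper c && !((ys ++ [y]).getLastD '_' == '_')
                         then ['_', c] else [c])) := by
      have h1 : (((ys ++ [y]).length : Nat) : Int) - 1 = ((ys.length : Nat) : Int) := by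
        push_cast [List.length_append, List.length_cons, List.length_nil]; omega
      have h2 : PySem.List.pyGetD ((ys ++ [y]) ++ c :: t) ((ys.length : Nat) : Int) ' ' = y := by
        rw [PySem.List.pyGetD_natCast, List.append_assoc, List.singleton_append]
        simp [List.getD_eq_getElem?_getD, List.getElem?_append_right]
      have h3 : decide (0 < (((ys ++ [y]).length : Nat) : Int)) = true := by
        simp [List.length_append]
      by_cases hcond : (PySem.Chars.isupper c && !(y == '_')) = true
      · simp [transA_step2, h1, h2, h3, List.getLastD_concat, hcond]
      · simp [transA_step2, h1, h2, h3, List.getLastD_concat, hcond]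
    rw [hstep]
    have hlen2 : ((((ys ++ [y]).length : Nat)) : Int) + 1 = ((((ys ++ [y]) ++ [c]).length : Nat) : Int) := by
      push_cast [List.length_append, List.length_cons, List.length_nil]; omega
    rw [hlen2]
    have ih' := ih ((ys ++ [y]) ++ [c])
      (acc ++ (if PySem.Chars.isupper c && !((ys ++ [y]).getLastD '_' == '_') then ['_', c] else [c]))
      (by simp)
    rw [List.append_assoc ((ys ++ [y])) [c] t] at ih'
    simp only [List.singleton_append, List.getLastD_concat] at ih'
    simp only [List.getLastD_concat]
    rw [ih']
    simp only [pass2t, List.getLastD_concat]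
    simp [List.append_assoc]

-- pass 2 fold, never sees '_'
theorem foldB_false_no (post pre acc : List Char) (h : '_' ∉ post) :
    (PySem.List.enumerate post (pre.length : Int)).foldl (transA_step2 (pre ++ post)) (false, acc)
      = (false, acc ++ post) := by
  induction post generalizing pre acc with
  | nil => simp [PySem.List.enumerate_nil]
  | cons c t ih =>
    rw [PySem.List.enumerate_cons, List.foldl_cons]
    have hc : (c == '_') = false := by
      simp only [beq_eq_false_iff_ne, ne_eq]
      exact fun he => h (by simp [he])
    have hstep : transA_step2 (pre ++ c :: t) (false, acc) ((pre.length : Int), c)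
        = (false, acc ++ [c]) := by
      simp [transA_step2, hc]
    rw [hstep]
    have hlen2 : ((pre.length : Nat) : Int) + 1 = (((pre ++ [c]).length : Nat) : Int) := by
      push_cast [List.length_append, List.length_cons, List.length_nil]; omega
    rw [hlen2]
    have ih' := ih (pre ++ [c]) (acc ++ [c]) (fun ht => h (List.mem_cons_of_mem _ ht))
    rw [List.append_assoc] at ih'
    simp only [List.singleton_append] at ih'
    rw [ih']
    simp

-- pass 2 fold, '_' split
theorem foldB_false (s0' rest pre acc : List Char) (h : '_' ∉ s0') :
    (PySem.List.enumerate (s0' ++ '_' :: rest) (pre.length : Int)).foldl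
        (transA_step2 (pre ++ (s0' ++ '_' :: rest))) (false, acc)
      = (true, acc ++ s0' ++ '_' :: pass2t rest '_') := by
  induction s0' generalizing pre acc with
  | nil =>
    simp only [List.nil_append]
    rw [PySem.List.enumerate_cons, List.foldl_cons]
    have hstep : transA_step2 (pre ++ '_' :: rest) (false, acc) ((pre.length : Int), '_')
        = (true, acc ++ ['_']) := by
      simp [transA_step2]
    rw [hstep]
    have hlen2 : ((pre.length : Nat) : Int) + 1 = (((pre ++ ['_']).length : Nat) : Int) := by
      push_cast [List.length_append, List.length_cons, List.length_nil]; omega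
    rw [hlen2]
    have hb := foldB_true rest (pre ++ ['_']) (acc ++ ['_']) (by simp)
    rw [List.append_assoc] at hb
    simp only [List.singleton_append, List.getLastD_concat] at hb
    rw [hb]
    simp
  | cons c t ih =>
    have hc : (c == '_') = false := by
      simp only [beq_eq_false_iff_ne, ne_eq]
      exact fun he => h (by simp [he])
    rw [List.cons_append, PySem.List.enumerate_cons, List.foldl_cons]
    have hstep : transA_step2 (pre ++ c :: (t ++ '_' :: rest)) (false, acc) ((pre.length : Int), c)
        = (false, acc ++ [c]) := by
      simp [transA_step2, hc]
    rw [hstep]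
    have hlen2 : ((pre.length : Nat) : Int) + 1 = (((pre ++ [c]).length : Nat) : Int) := by
      push_cast [List.length_append, List.length_cons, List.length_nil]; omega
    rw [hlen2]
    have ih' := ih (pre ++ [c]) (acc ++ [c]) (fun ht => h (List.mem_cons_of_mem _ ht))
    rw [List.append_assoc] at ih'
    simp only [List.singleton_append] at ih'
    rw [ih']
    simp

-- B's loop, no '_'
theorem altLoop_no {cs : List Char} (h : '_' ∉ cs) (p : Char) : altLoop cs false p = cs := by
  induction cs generalizing p with
  | nil => rfl
  | cons c t ih =>
    have hc : (c == '_') = false := by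
      simp only [beq_eq_false_iff_ne, ne_eq]
      exact fun he => h (by simp [he])
    simp only [altLoop, Bool.not_false, if_true, hc]
    rw [ih (fun ht => h (List.mem_cons_of_mem _ ht)) c]

-- B's loop, split at first '_'
theorem altLoop_split {s0' : List Char} (h : '_' ∉ s0') (s1 : List Char) (p : Char) :
    altLoop (s0' ++ '_' :: s1) false p = s0' ++ '_' :: altLoop s1 true '_' := by
  induction s0' generalizing p with
  | nil => simp [altLoop]
  | cons c t ih =>
    have hc : (c == '_') = false := by
      simp only [beq_eq_false_iff_ne, ne_eq]
      exact fun he => h (by simp [he])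
    simp only [List.cons_append, altLoop, Bool.not_false, if_true, hc]
    rw [ih (fun ht => h (List.mem_cons_of_mem _ ht)) c]

-- B's post-'_' loop computes pass 2 of pass 1
theorem altTrue_eq (s1 : List Char) (p q : Char) (hq : (q = '_') ↔ (p = '_')) :
    altLoop s1 true p = pass2t (low1 s1 p) q := by
  induction s1 generalizing p q with
  | nil => rfl
  | cons c t ih =>
    simp only [low1, altLoop, Bool.not_true, Bool.false_eq_true, if_false, pass2t]
    have hq : (q == '_') = (p == '_') := by
      by_cases hp : p = '_'
      · simp [hp, hq.mpr hp]
      · have : q ≠ '_' := fun he => hp (hq.mp he)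
        simp [hp, this]
    rw [hq]
    set e := if (PySem.Chars.isupper c && PySem.Chars.isupper p) = true then PySem.Chars.lowerChar c else c with he
    have hrec : altLoop t true c = pass2t (low1 t c) e := by
      apply ih
      constructor
      · intro hee
        by_cases hcond : (PySem.Chars.isupper c && PySem.Chars.isupper p) = true
        · exact absurd (by rw [he, if_pos hcond] at hee; exact hee)
            (lowerChar_ne_underscore ((Bool.and_eq_true _ _).mp hcond).1)
        · rw [he, if_neg hcond] at hee; exact hee
      · intro hc
        have hcond : (PySem.Chars.isupper c && PySem.Chars.isupper p) = false := by
          subst hc; simp [isupper_underscore]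
        rw [he, if_neg (by simp [hcond])]
        exact hc
    rw [hrec]

-- ===== VERDICT (by name: the statement is the Claim_ definition above) =====
theorem underscore_mem_of_infix {cs : List Char} (h : '_' ∈ cs) : ['_'] <:+: cs := by
  obtain ⟨pre, suf, rfl⟩ := List.append_of_mem h
  exact ⟨pre, suf, by simp⟩

theorem trans_enum_str_spec : Claim_equal_trans_enum_str := by
  intro str _
  unfold Spec_trans_enum_str trans_enum_str trans_enum_str_alt
  by_cases hf : PySem.Str.find str "_" = -1
  · -- no underscore
    have hmem : '_' ∉ str.toList := by
      intro hm
      exact ((PySem.Str.find_eq_neg_one_iff str "_").mp hf) (by simpa using underscore_mem_of_infix hm)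
    rw [hf]
    have hA := foldA_gen str.toList [] []
    simp only [List.nil_append, List.length_nil, Nat.cast_zero, List.getLastD_nil] at hA
    have hB := foldB_false_no (low1 str.toList '_') [] []
      (mem_underscore_low1 hmem '_')
    simp only [List.nil_append, List.length_nil, Nat.cast_zero] at hB
    simp only [show (-1 : Int) + 1 = 0 from by norm_num, PySem.List.slice_zero_start,
      PySem.List.slice_none_none]
    rw [show PySem.List.slice str.toList none (some 0) = [] from by
      rw [PySem.List.slice_to]
      · simp
      · omega]
    simp only [List.nil_append]
    rw [hA, hB]
    rw [altLoop_no hmem]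
    rw [upper_low1]
  · -- underscore at index n
    have hf' : PySem.Chars.findFrom str.toList "_".toList ((0 : Nat) : Int) ≠ -1 := by
      simp only [Nat.cast_zero, PySem.Chars.findFrom_zero]
      simpa using hf
    obtain ⟨hge, hpre, hmin⟩ :=
      PySem.Chars.findFrom_natCast_spec str.toList "_".toList 0 (Nat.zero_le _) hf'
    simp only [Nat.cast_zero, PySem.Chars.findFrom_zero] at hge hpre hmin
    have hfind : PySem.Chars.find str.toList "_".toList = PySem.Str.find str "_" := by
      simp
    rw [hfind] at hge hpre hmin
    set F := PySem.Str.find str "_" with hFdef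
    set n := F.toNat with hndef
    have hFn : F = (n : Int) := (Int.toNat_of_nonneg (by exact_mod_cast hge)).symm
    obtain ⟨t, ht⟩ := hpre
    simp only [show ("_" : String).toList = ['_'] from rfl, List.singleton_append] at ht hmin
    -- ht : '_' :: t = List.drop n str.toList
    have hn_lt : n < str.toList.length := by
      by_contra hge'
      rw [List.drop_eq_nil_of_le (by omega)] at ht
      exact (List.cons_ne_nil _ _) ht
    have hgetn : str.toList[n]? = some '_' := by
      rw [← List.head?_drop, ← ht]; rfl
    have hdrop1 : List.drop (n + 1) str.toList = t := by
      have := congrArg List.tail ht.symm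
      simpa [List.tail_drop] using this
    have hnot : '_' ∉ List.take n str.toList := by
      intro hm
      obtain ⟨i, hi, hgi⟩ := List.mem_iff_getElem.mp hm
      rw [List.length_take] at hi
      have hi' : i < n := by omega
      have hilt : i < str.toList.length := by omega
      refine hmin i (Nat.zero_le _) hi' ?_
      rw [List.drop_eq_getElem_cons hilt]
      have : str.toList[i] = '_' := by
        rw [← hgi]; simp [List.getElem_take]
      rw [this]
      exact ⟨List.drop (i+1) str.toList, rfl⟩
    -- slices
    have hs0 : PySem.List.slice str.toList none (some (F + 1)) = List.take n str.toList ++ ['_'] := by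
      rw [hFn, show ((n : Int) + 1) = ((n + 1 : Nat) : Int) from by push_cast; ring]
      rw [PySem.List.slice_to]
      · simp [List.take_add_one, hgetn]
      · positivity
    have hs1 : PySem.List.slice str.toList (some (F + 1)) none = t := by
      rw [hFn, show ((n : Int) + 1) = ((n + 1 : Nat) : Int) from by push_cast; ring]
      rw [PySem.List.slice_from]
      · simp only [Int.toNat_natCast]
        exact hdrop1
      · positivity
    simp only [hs0, hs1]
    have hA := foldA_gen t [] []
    simp only [List.nil_append, List.length_nil, Nat.cast_zero, List.getLastD_nil] at hA
    rw [hA]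
    have hsplit : str.toList = List.take n str.toList ++ '_' :: t := by
      conv_lhs => rw [← List.take_append_drop n str.toList]
      rw [← ht]
    have hB := foldB_false (List.take n str.toList) (low1 t '_') [] [] hnot
    simp only [List.nil_append, List.length_nil, Nat.cast_zero] at hB
    rw [show (List.take n str.toList ++ ['_']) ++ low1 t '_'
          = List.take n str.toList ++ '_' :: low1 t '_' from by simp]
    rw [hB]
    conv_rhs => rw [hsplit]
    rw [altLoop_split hnot t ' ']
    rw [altTrue_eq t '_' '_' Iff.rfl]
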